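-- pv_equiv track=rewrite | github.com/honu-shell-utions/python | sandbox/project_euler/951-1000/955-finding_triangles1.py | next_hit_from_triangle_index
-- ===== SOURCE A (Python) =====
-- def next_hit_from_triangle_index(t):
--     N = t * (t + 1)
--     best_g = None
--     best_m = None
--
--     a = 1
--     while a * a <= N:
--         if N % a == 0:
--             b = N // a
--
--             # need g to be a positive integer
--             if (b - a - 1) % 2 == 0:
--                 g = (b - a - 1) // 2
--                 m = (a + b - 1) // 2
--
--                 if g > 0 and (best_g is None or g < best_g):
--                     best_g = g
--                     best_m = m
--         a += 1
--
--     return best_g, best_m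
-- ===== SOURCE B (Python) =====
-- def next_hit_from_triangle_index(t):
--     # N = t*(t+1) = s*(s+1) with s >= 0, so floor(sqrt(N)) = s: scan divisors
--     # downward from s and return at the FIRST valid one (g grows as a shrinks,
--     # so the first hit from the top already has the minimal g).
--     N = t * (t + 1)
--     a = t if t >= 0 else -t - 1
--     while a >= 1:
--         if N % a == 0:
--             b = N // a
--             if (b - a - 1) % 2 == 0:
--                 g = (b - a - 1) // 2
--                 if g > 0:
--                     return g, (a + b - 1) // 2
--         a -= 1
--     return None, None
-- ===== Notes on version B (the rewrite author's own statement) =====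
-- stated objective: faster
-- what changed: B replaces A's full upward divisor scan with a running minimum by a downward scan from floor(sqrt(N)) (which is t, or -t-1 for negative t, since N = t*(t+1)) that returns at the first valid divisor, because g strictly decreases as the divisor grows.
import Mathlib
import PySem

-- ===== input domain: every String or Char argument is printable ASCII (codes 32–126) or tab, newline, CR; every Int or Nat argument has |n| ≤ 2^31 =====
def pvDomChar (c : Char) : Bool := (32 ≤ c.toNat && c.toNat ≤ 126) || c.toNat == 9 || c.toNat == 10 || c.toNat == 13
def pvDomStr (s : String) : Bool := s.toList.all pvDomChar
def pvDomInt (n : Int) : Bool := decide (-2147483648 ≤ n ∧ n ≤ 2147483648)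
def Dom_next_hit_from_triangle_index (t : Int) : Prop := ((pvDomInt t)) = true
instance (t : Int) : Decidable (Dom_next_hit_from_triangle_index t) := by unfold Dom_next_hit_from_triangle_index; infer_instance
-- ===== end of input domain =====

-- B replaces A's full upward scan (keeping a running minimum) by a downward scan
-- from ⌊√N⌋ = (t if t ≥ 0 else -t-1) that returns at the FIRST valid divisor:
-- g shrinks as a grows, so the first hit from the top is the minimum (faster: early exit).

-- termination helper for port A's while loop (cited by the port)
lemma pv_a_le_of_sq_le (a N : Int) (h : a * a ≤ N) : a ≤ N := by
  rcases le_or_gt a 0 with h0 | h0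
  · nlinarith
  · nlinarith

-- ===== PORT A =====
-- while a*a <= N carrying (best_g, best_m); 'best_g is None or g < best_g' ported by the match
def pvALoop (N a : Int) (bg bm : Option Int) : Option Int × Option Int :=
  if h : a * a ≤ N then
    if PySem.Int.mod N a = 0 then
      let b := PySem.Int.floordiv N a
      if PySem.Int.mod (b - a - 1) 2 = 0 then
        let g := PySem.Int.floordiv (b - a - 1) 2
        let m := PySem.Int.floordiv (a + b - 1) 2
        let upd : Bool := bg.elim true (fun x => decide (g < x))
        if 0 < g ∧ upd = true then
          pvALoop N (a + 1) (some g) (some m)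
        else
          pvALoop N (a + 1) bg bm
      else pvALoop N (a + 1) bg bm
    else pvALoop N (a + 1) bg bm
  else (bg, bm)
termination_by (N + 1 - a).toNat
decreasing_by all_goals (have := pv_a_le_of_sq_le a N h; omega)

def next_hit_from_triangle_index (t : Int) : Option Int × Option Int :=
  pvALoop (t * (t + 1)) 1 none none

-- ===== PORT B =====
-- downward while a >= 1; returns at the first valid divisor
def pvBLoop (N a : Int) : Option Int × Option Int :=
  if h : 1 ≤ a then
    if PySem.Int.mod N a = 0 then
      let b := PySem.Int.floordiv N a
      if PySem.Int.mod (b - a - 1) 2 = 0 then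
        let g := PySem.Int.floordiv (b - a - 1) 2
        if 0 < g then (some g, some (PySem.Int.floordiv (a + b - 1) 2))
        else pvBLoop N (a - 1)
      else pvBLoop N (a - 1)
    else pvBLoop N (a - 1)
  else (none, none)
termination_by a.toNat
decreasing_by all_goals omega

def next_hit_from_triangle_index_alt (t : Int) : Option Int × Option Int :=
  pvBLoop (t * (t + 1)) (if 0 ≤ t then t else -t - 1)

-- ===== PRECONDITION & SPEC =====
def Spec_next_hit_from_triangle_index (t : Int) (out : Option Int × Option Int) : Prop := out = next_hit_from_triangle_index_alt t
instance (t : Int) (out : Option Int × Option Int) : Decidable (Spec_next_hit_from_triangle_index t out) := by unfold Spec_next_hit_from_triangle_index; infer_instance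

-- ===== CLAIM (what is proved, stated in full; the proofs are below) =====
def Claim_equal_next_hit_from_triangle_index : Prop := ∀ (t : Int), Dom_next_hit_from_triangle_index t → Spec_next_hit_from_triangle_index t (next_hit_from_triangle_index t)

-- ===== LEMMAS AND PROOFS =====

-- 'a is a valid divisor' and its candidate answer
abbrev pvValid (N a : Int) : Prop :=
  PySem.Int.mod N a = 0 ∧
  PySem.Int.mod (PySem.Int.floordiv N a - a - 1) 2 = 0 ∧
  0 < PySem.Int.floordiv (PySem.Int.floordiv N a - a - 1) 2


def pvCand (N a : Int) : Option Int × Option Int :=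
  (some (PySem.Int.floordiv (PySem.Int.floordiv N a - a - 1) 2),
   some (PySem.Int.floordiv (a + PySem.Int.floordiv N a - 1) 2))

-- downward scan from hi with lower bound lo: first valid divisor wins
def pvScan (N hi lo : Int) : Option Int × Option Int :=
  if h : lo ≤ hi then
    if pvValid N hi then pvCand N hi else pvScan N (hi - 1) lo
  else (none, none)
termination_by (hi + 1 - lo).toNat
decreasing_by omega

lemma pvScan_empty (N hi lo : Int) (h : hi < lo) : pvScan N hi lo = (none, none) := by
  rw [pvScan]; simp [not_le.mpr h]

lemma pvCand_ne (N a : Int) : pvCand N a ≠ (none, none) := by simp [pvCand]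

lemma pvBLoop_eq_scan (N a : Int) : pvBLoop N a = pvScan N a 1 := by
  rw [pvBLoop, pvScan]
  by_cases h1 : 1 ≤ a
  · have ih := pvBLoop_eq_scan N (a - 1)
    simp only [dif_pos h1]
    by_cases h2 : PySem.Int.mod N a = 0
    · by_cases h3 : PySem.Int.mod (PySem.Int.floordiv N a - a - 1) 2 = 0
      · by_cases h4 : 0 < PySem.Int.floordiv (PySem.Int.floordiv N a - a - 1) 2
        · simp at h3 h4 ⊢
          simp [h2, h3, h4, pvValid, pvCand]
        · simp at h3 h4 ⊢
          simp [h2, h3, pvValid, ih, pvCand]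
      · simp at h3 ⊢
        simp [h2, h3, pvValid, ih]
    · simp [h2, pvValid, ih]
  · simp [h1]
termination_by a.toNat
decreasing_by omega

-- peel the BOTTOM element off a downward scan
lemma pvScan_peel (N hi lo : Int) (h : lo ≤ hi) :
    pvScan N hi lo =
      if pvScan N hi (lo + 1) = (none, none) then
        (if pvValid N lo then pvCand N lo else (none, none))
      else pvScan N hi (lo + 1) := by
  rcases eq_or_lt_of_le h with heq | hlt
  · subst heq
    rw [pvScan_empty N lo (lo + 1) (by omega)]
    rw [pvScan]
    simp only [le_refl, dif_pos]
    rw [pvScan_empty N (lo - 1) lo (by omega)]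
    simp
  · have ih := pvScan_peel N (hi - 1) lo (by omega)
    have hunf : pvScan N hi (lo + 1) =
        if pvValid N hi then pvCand N hi else pvScan N (hi - 1) (lo + 1) := by
      rw [pvScan]; simp only [dif_pos (show lo + 1 ≤ hi by omega)]
    rw [pvScan, hunf]
    simp only [dif_pos h]
    by_cases hv : pvValid N hi
    · rw [if_pos hv, if_pos hv, if_neg (pvCand_ne N hi)]
    · rw [if_neg hv, if_neg hv]; exact ih
termination_by (hi + 1 - lo).toNat
decreasing_by omega

-- exact division facts
lemma pv_div_mul (N a : Int) (ha : 0 < a) (h : PySem.Int.mod N a = 0) :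
    a * PySem.Int.floordiv N a = N := by
  rw [PySem.Int.floordiv_eq_ediv_of_pos ha]
  rw [PySem.Int.mod_eq_emod_of_pos ha] at h
  exact Int.mul_ediv_cancel' (Int.dvd_of_emod_eq_zero h)

lemma pv_half_lt (x y : Int) (hx : PySem.Int.mod x 2 = 0) (hy : PySem.Int.mod y 2 = 0)
    (hxy : x < y) :
    PySem.Int.floordiv x 2 < PySem.Int.floordiv y 2 := by
  rw [PySem.Int.mod_eq_emod_of_pos (by norm_num)] at hx hy
  rw [PySem.Int.floordiv_eq_ediv_of_pos (by norm_num), PySem.Int.floordiv_eq_ediv_of_pos (by norm_num)]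
  omega

-- strict monotonicity: among valid divisors below √N, larger a gives smaller g
lemma pv_g_mono (N a0 a : Int) (h0 : 1 ≤ a0) (h0a : a0 < a) (hN : 0 < N)
    (hv0 : pvValid N a0) (hv : pvValid N a) :
    PySem.Int.floordiv (PySem.Int.floordiv N a - a - 1) 2 <
      PySem.Int.floordiv (PySem.Int.floordiv N a0 - a0 - 1) 2 := by
  obtain ⟨hm0, hp0, -⟩ := hv0
  obtain ⟨hm, hp, -⟩ := hv
  have e0 := pv_div_mul N a0 (by omega) hm0
  have e := pv_div_mul N a (by omega) hm
  set b0 := PySem.Int.floordiv N a0 with hb0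
  set b := PySem.Int.floordiv N a with hb
  have hbpos : 0 < b := by nlinarith
  have hblt : b < b0 := by nlinarith
  exact pv_half_lt _ _ hp hp0 (by omega)

-- a*a ≤ s*(s+1) ↔ a ≤ s, for 1 ≤ a, 0 ≤ s
lemma pv_sq_iff (a s : Int) (ha : 1 ≤ a) (hs : 0 ≤ s) : a * a ≤ s * (s + 1) ↔ a ≤ s := by
  constructor
  · intro h; by_contra hc
    have h1 : s + 1 ≤ a := by omega
    nlinarith
  · intro h; nlinarith

-- one unfolding of A's loop body in the running range
lemma pvALoop_step (N a : Int) (bg bm : Option Int) (hsq : a * a ≤ N) :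
    pvALoop N a bg bm =
      if pvValid N a ∧ (bg.elim true
          (fun x => decide (PySem.Int.floordiv (PySem.Int.floordiv N a - a - 1) 2 < x))) = true then
        pvALoop N (a + 1)
          (some (PySem.Int.floordiv (PySem.Int.floordiv N a - a - 1) 2))
          (some (PySem.Int.floordiv (a + PySem.Int.floordiv N a - 1) 2))
      else pvALoop N (a + 1) bg bm := by
  rw [pvALoop]
  rw [dif_pos hsq]
  by_cases h2 : PySem.Int.mod N a = 0
  · rw [if_pos h2]
    by_cases h3 : PySem.Int.mod (PySem.Int.floordiv N a - a - 1) 2 = 0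
    · rw [if_pos h3]
      by_cases h4 : 0 < PySem.Int.floordiv (PySem.Int.floordiv N a - a - 1) 2
      · by_cases hu : (bg.elim true
            (fun x => decide (PySem.Int.floordiv (PySem.Int.floordiv N a - a - 1) 2 < x))) = true
        · rw [if_pos ⟨h4, hu⟩, if_pos ⟨⟨h2, h3, h4⟩, hu⟩]
        · rw [if_neg (fun hc => hu hc.2), if_neg (fun hc => hu hc.2)]
      · rw [if_neg (fun hc => h4 hc.1), if_neg (fun hc => h4 hc.1.2.2)]
    · rw [if_neg h3, if_neg (fun hc => h3 hc.1.2.1)]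
  · rw [if_neg h2, if_neg (fun hc => h2 hc.1.1)]

-- main invariant lemma for A's upward loop: carrying a best that comes from some
-- already-seen valid divisor, the loop computes the downward scan from the top
lemma pvALoop_eq (s : Int) (hs : 0 ≤ s) (a : Int) (bg bm : Option Int) (ha : 1 ≤ a)
    (hinv : (bg = (none : Option Int) ∧ bm = (none : Option Int)) ∨
      (∃ a0, 1 ≤ a0 ∧ a0 < a ∧ a0 ≤ s ∧ pvValid (s * (s + 1)) a0 ∧
        (bg, bm) = pvCand (s * (s + 1)) a0)) :
    pvALoop (s * (s + 1)) a bg bm =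
      (if pvScan (s * (s + 1)) s a = (none, none) then (bg, bm)
       else pvScan (s * (s + 1)) s a) := by
  by_cases hle : a ≤ s
  · have hN0 : 0 < s * (s + 1) := by nlinarith
    have hpeel := pvScan_peel (s * (s + 1)) s a hle
    have hsq : a * a ≤ s * (s + 1) := (pv_sq_iff a s ha hs).mpr hle
    rw [pvALoop_step (s * (s + 1)) a bg bm hsq]
    by_cases hv : pvValid (s * (s + 1)) a
    · -- a is valid: the running best is always beaten, so the update fires
      have hupd : (bg.elim true
          (fun x => decide (PySem.Int.floordiv (PySem.Int.floordiv (s * (s + 1)) a - a - 1) 2 < x))) = true := by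
        rcases hinv with ⟨hbg, -⟩ | ⟨a0, h01, h0a, h0s, hv0, hcand⟩
        · subst hbg; rfl
        · have hbg : bg = some (PySem.Int.floordiv (PySem.Int.floordiv (s * (s + 1)) a0 - a0 - 1) 2) := by
            have := congrArg Prod.fst hcand
            simpa [pvCand] using this
          subst hbg
          simpa using pv_g_mono (s * (s + 1)) a0 a h01 h0a hN0 hv0 hv
      rw [if_pos ⟨hv, hupd⟩]
      have ih := pvALoop_eq s hs (a + 1)
        (some (PySem.Int.floordiv (PySem.Int.floordiv (s * (s + 1)) a - a - 1) 2))
        (some (PySem.Int.floordiv (a + PySem.Int.floordiv (s * (s + 1)) a - 1) 2))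
        (by omega) (Or.inr ⟨a, ha, by omega, hle, hv, rfl⟩)
      rw [ih]
      have hne : pvScan (s * (s + 1)) s a ≠ (none, none) := by
        rw [hpeel, if_pos hv]
        split
        · exact pvCand_ne _ _
        · assumption
      rw [if_neg hne, hpeel, if_pos hv]
      split <;> rfl
    · -- a contributes nothing: the best is carried unchanged
      rw [if_neg (fun hc => hv hc.1)]
      have ih := pvALoop_eq s hs (a + 1) bg bm (by omega)
        (by rcases hinv with h | ⟨a0, h01, h0a, h0s, hv0, hcand⟩
            · exact Or.inl h
            · exact Or.inr ⟨a0, h01, by omega, h0s, hv0, hcand⟩)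
      rw [ih, hpeel, if_neg hv]
      by_cases hnn : pvScan (s * (s + 1)) s (a + 1) = (none, none)
      · simp [hnn]
      · simp [hnn]
  · -- a is past the top: the loop stops and the scan range is empty
    rw [pvALoop]
    have hsq : ¬ a * a ≤ s * (s + 1) := by
      intro h; exact hle ((pv_sq_iff a s ha hs).mp h)
    rw [pvScan_empty (s * (s + 1)) s a (by omega)]
    simp [hsq]
termination_by (s + 1 - a).toNat
decreasing_by all_goals omega

theorem pv_main (t : Int) : next_hit_from_triangle_index t = next_hit_from_triangle_index_alt t := by
  unfold next_hit_from_triangle_index next_hit_from_triangle_index_alt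
  set s : Int := if 0 ≤ t then t else -t - 1 with hsdef
  have hs : 0 ≤ s := by rw [hsdef]; split <;> omega
  have hN : t * (t + 1) = s * (s + 1) := by rw [hsdef]; split <;> ring
  rw [hN, pvBLoop_eq_scan]
  rw [pvALoop_eq s hs 1 none none le_rfl (Or.inl ⟨rfl, rfl⟩)]
  split <;> simp_all

-- ===== VERDICT (by name: the statement is the Claim_ definition above) =====
theorem next_hit_from_triangle_index_spec : Claim_equal_next_hit_from_triangle_index := by
  intro t _
  exact pv_main t
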